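-- pv_equiv track=rewrite | github.com/fufufukakaka/poke_battle_logger | poke_battle_logger/batch/frame_compressor.py | message_frame_compress
-- ===== SOURCE A (Python) =====
-- from typing import List
--
-- def message_frame_compress(
--     target_frames: List[int], frame_threshold: int = 3
-- ) -> List[List[int]]:
--     # フレームを連続区間で分割する
--     message_frame_results = []
--     temp2 = []
--     for i in range(len(target_frames)):
--         temp2.append(target_frames[i])
--         if (
--             i < len(target_frames) - 1
--             and target_frames[i + 1] - target_frames[i] > frame_threshold
--         ):
--             if len(temp2) > 1:
--                 message_frame_results.append(temp2)
--             temp2 = []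
--     message_frame_results.append(temp2)
--     return message_frame_results
-- ===== SOURCE B (Python) =====
-- from typing import List
--
-- def message_frame_compress(
--     target_frames: List[int], frame_threshold: int = 3
-- ) -> List[List[int]]:
--     # Staged index/slicing approach: (1) collect the cut positions where the
--     # gap between adjacent frames exceeds the threshold, (2) slice the input
--     # between consecutive boundaries to get the runs, (3) keep every run except
--     # the last only if it has more than one frame, and the last unconditionally.
--     n = len(target_frames)
--     cuts = [i + 1 for i in range(n - 1)
--             if target_frames[i + 1] - target_frames[i] > frame_threshold]
--     bounds = [0] + cuts + [n]
--     runs = [target_frames[a:b] for a, b in zip(bounds, bounds[1:])]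
--     return [r for r in runs[:-1] if len(r) > 1] + [runs[-1]]
-- ===== Notes on version B (the rewrite author's own statement) =====
-- stated objective: alternative
-- what changed: A makes one pass with a mutable temp buffer, flushing and filtering groups inline; B has no accumulator at all: it first collects the cut indices where adjacent frames differ by more than the threshold, then materializes the runs by slicing the input between consecutive boundaries, and filters short non-final runs in a final pass.
import Mathlib
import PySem

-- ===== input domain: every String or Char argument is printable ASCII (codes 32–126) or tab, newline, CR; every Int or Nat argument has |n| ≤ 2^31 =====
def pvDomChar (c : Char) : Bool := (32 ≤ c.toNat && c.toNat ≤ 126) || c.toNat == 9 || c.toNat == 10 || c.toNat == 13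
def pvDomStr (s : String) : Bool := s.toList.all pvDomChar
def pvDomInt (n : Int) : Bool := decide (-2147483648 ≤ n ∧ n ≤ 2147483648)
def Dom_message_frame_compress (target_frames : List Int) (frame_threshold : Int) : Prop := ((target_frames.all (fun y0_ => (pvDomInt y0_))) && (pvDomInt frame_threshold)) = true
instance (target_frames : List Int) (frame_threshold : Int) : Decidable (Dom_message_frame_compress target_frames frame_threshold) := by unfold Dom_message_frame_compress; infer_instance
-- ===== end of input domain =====

-- B replaces A's single pass with a mutable temp buffer by three staged passes:
-- collect cut indices, slice the input between boundaries, filter short non-final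
-- runs (objective: alternative).

-- ===== PORT A =====
-- loop body of A's for-loop (state = (message_frame_results, temp2))
def pvStepA (tf : List Int) (thr : Int) (st : List (List Int) × List Int) (i : Int) :
    List (List Int) × List Int :=
  let temp2 := st.2 ++ [PySem.List.pyGetD tf i 0]
  if i < (tf.length : Int) - 1 ∧
      PySem.List.pyGetD tf (i + 1) 0 - PySem.List.pyGetD tf i 0 > thr then
    ((if temp2.length > 1 then st.1 ++ [temp2] else st.1), ([] : List Int))
  else (st.1, temp2)

def message_frame_compress (target_frames : List Int) (frame_threshold : Int) : List (List Int) :=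
  let st := (PySem.List.pyRange 0 (target_frames.length : Int) 1).foldl
              (pvStepA target_frames frame_threshold) ([], [])
  st.1 ++ [st.2]

-- ===== PORT B =====
def message_frame_compress_alt (target_frames : List Int) (frame_threshold : Int) : List (List Int) :=
  let n : Int := target_frames.length
  let cuts := ((PySem.List.pyRange 0 (n - 1) 1).filter
      (fun i => decide (PySem.List.pyGetD target_frames (i + 1) 0
                        - PySem.List.pyGetD target_frames i 0 > frame_threshold))).map
      (fun i => i + 1)
  let bounds := (0 : Int) :: (cuts ++ [n])
  let runs := (bounds.zip (PySem.List.slice bounds (some 1) none)).map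
      (fun p => PySem.List.slice target_frames (some p.1) (some p.2))
  runs.dropLast.filter (fun r => decide (1 < r.length)) ++ [runs.getLastD []]

-- ===== PRECONDITION & SPEC =====
def Spec_message_frame_compress (target_frames : List Int) (frame_threshold : Int) (out : List (List Int)) : Prop := out = message_frame_compress_alt target_frames frame_threshold
instance (target_frames : List Int) (frame_threshold : Int) (out : List (List Int)) : Decidable (Spec_message_frame_compress target_frames frame_threshold out) := by unfold Spec_message_frame_compress; infer_instance

-- ===== CLAIM (what is proved, stated in full; the proofs are below) =====
def Claim_equal_message_frame_compress : Prop := ∀ (target_frames : List Int) (frame_threshold : Int), Dom_message_frame_compress target_frames frame_threshold → Spec_message_frame_compress target_frames frame_threshold (message_frame_compress target_frames frame_threshold)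

-- ===== LEMMAS AND PROOFS =====

-- recursive rendering of A's loop (recursion on the list suffix)
def pvRecA (thr : Int) : List Int → List (List Int) × List Int → List (List Int) × List Int
  | [], s => s
  | [x], s => (s.1, s.2 ++ [x])
  | x :: y :: xs, s =>
      let temp2 := s.2 ++ [x]
      if y - x > thr then
        pvRecA thr (y :: xs) ((if temp2.length > 1 then s.1 ++ [temp2] else s.1), [])
      else pvRecA thr (y :: xs) (s.1, temp2)

-- prepend a list of elements to the head group of a partition
def pvConsHead (t : List Int) : List (List Int) → List (List Int)
  | [] => [t]
  | r :: rs => (t ++ r) :: rs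

-- the full partition into consecutive runs, built by structural recursion
def pvRunsRec (thr : Int) : List Int → List (List Int)
  | [] => [[]]
  | [x] => [[x]]
  | x :: y :: xs =>
      if y - x > thr then [x] :: pvRunsRec thr (y :: xs)
      else pvConsHead [x] (pvRunsRec thr (y :: xs))

-- the Nat-level cut positions (index i+1 whenever the gap at i exceeds thr)
def pvCutsN (thr : Int) : List Int → List Nat
  | [] => []
  | [_] => []
  | x :: y :: xs =>
      (if y - x > thr then [1] else []) ++ (pvCutsN thr (y :: xs)).map (· + 1)

-- slices of l between consecutive members of 0 :: bs
def pvRunsOf (l : List Int) (bs : List Nat) : List (List Int) :=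
  ((0 :: bs).zip bs).map (fun p => (l.drop p.1).take (p.2 - p.1))

lemma pvFoldA_eq_recA (tf : List Int) (thr : Int) :
    ∀ (d : List Int) (k : Nat) (s : List (List Int) × List Int),
      tf.drop k = d →
      (PySem.List.pyRange (k : Int) (tf.length : Int) 1).foldl (pvStepA tf thr) s
        = pvRecA thr d s := by
  intro d
  induction d with
  | nil =>
    intro k s hd
    have hk : tf.length ≤ k := by
      have := List.drop_eq_nil_iff.mp hd; omega
    rw [PySem.List.pyRange_one_eq_nil (by exact_mod_cast hk)]
    simp [pvRecA]
  | cons x d ih =>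
    intro k s hd
    have hlen : tf.length - k = d.length + 1 := by
      have h := congrArg List.length hd
      rw [List.length_drop] at h
      simpa using h
    have hk : k < tf.length := by omega
    have hx : tf[k]? = some x := by
      have h0 : (tf.drop k)[0]? = tf[k + 0]? := List.getElem?_drop
      rw [hd] at h0; simpa using h0.symm
    have hgx : PySem.List.pyGetD tf (k : Int) 0 = x := by
      rw [PySem.List.pyGetD_natCast]
      simp [List.getD, hx]
    rw [PySem.List.pyRange_one_cons (by exact_mod_cast hk)]
    have hdrop1 : tf.drop (k + 1) = d := by
      have h1 : tf.drop (k + 1) = (tf.drop k).drop 1 := by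
        rw [List.drop_drop]
      rw [h1, hd]; simp
    rw [List.foldl_cons]
    have hcast : (k : Int) + 1 = ((k + 1 : Nat) : Int) := by push_cast; ring
    cases d with
    | nil =>
      have hlast : tf.length = k + 1 := by simp at hlen; omega
      have hcond : ¬ ((k : Int) < (tf.length : Int) - 1 ∧
          PySem.List.pyGetD tf ((k : Int) + 1) 0 - x > thr) := by
        rintro ⟨h1, _⟩
        rw [hlast] at h1
        push_cast at h1
        omega
      have hrange : PySem.List.pyRange ((k : Int) + 1) (tf.length : Int) 1 = [] := by
        apply PySem.List.pyRange_one_eq_nil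
        rw [hlast]; push_cast; omega
      rw [hrange]
      simp only [List.foldl_nil, pvStepA, pvRecA, hgx]
      rw [if_neg hcond]
    | cons y d' =>
      have hlen2 : k + 1 < tf.length := by simp at hlen; omega
      have hy : tf[k + 1]? = some y := by
        have h0 : (tf.drop (k + 1))[0]? = tf[(k + 1) + 0]? := List.getElem?_drop
        rw [hdrop1] at h0; simpa using h0.symm
      have hgy : PySem.List.pyGetD tf ((k : Int) + 1) 0 = y := by
        rw [hcast, PySem.List.pyGetD_natCast]
        simp [List.getD, hy]
      have hklt : (k : Int) < (tf.length : Int) - 1 := by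
        have : ((k + 1 : Nat) : Int) < (tf.length : Int) := by exact_mod_cast hlen2
        push_cast at this; omega
      simp only [pvStepA, pvRecA, hgx, hgy]
      by_cases hc : y - x > thr
      · rw [if_pos ⟨hklt, hc⟩, if_pos hc, hcast, ih (k + 1) _ hdrop1]
      · rw [if_neg (fun h => hc h.2), if_neg hc, hcast, ih (k + 1) _ hdrop1]

lemma pvRunsRec_ne_nil (thr : Int) (xs : List Int) : pvRunsRec thr xs ≠ [] := by
  match xs with
  | [] => simp [pvRunsRec]
  | [x] => simp [pvRunsRec]
  | x :: y :: l =>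
    simp only [pvRunsRec]
    split
    · simp
    · cases h : pvRunsRec thr (y :: l) with
      | nil => exact absurd h (pvRunsRec_ne_nil thr (y :: l))
      | cons r rs => simp [pvConsHead]

-- A's loop result, flushed and filtered, is the filtered run partition
lemma pvCore (thr : Int) :
    ∀ (xs : List Int) (G : List (List Int)) (temp : List Int),
      (pvRecA thr xs (G.filter (fun r => decide (1 < r.length)), temp)).1
        ++ [(pvRecA thr xs (G.filter (fun r => decide (1 < r.length)), temp)).2]
        = (G ++ pvConsHead temp (pvRunsRec thr xs)).dropLast.filter
            (fun r => decide (1 < r.length))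
          ++ [(G ++ pvConsHead temp (pvRunsRec thr xs)).getLastD []] := by
  intro xs
  induction xs with
  | nil =>
    intro G temp
    simp [pvRecA, pvRunsRec, pvConsHead]
  | cons x l ih =>
    intro G temp
    cases l with
    | nil =>
      simp [pvRecA, pvRunsRec, pvConsHead]
    | cons y l' =>
      by_cases hc : y - x > thr
      · have hfilter : (if (temp ++ [x]).length > 1
              then G.filter (fun r => decide (1 < r.length)) ++ [temp ++ [x]]
              else G.filter (fun r => decide (1 < r.length)))
            = (G ++ [temp ++ [x]]).filter (fun r => decide (1 < r.length)) := by
          rw [List.filter_append]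
          by_cases h : (temp ++ [x]).length > 1
          · rw [if_pos h]
            have h' : 0 < temp.length := by
              simp only [List.length_append, List.length_cons, List.length_nil] at h; omega
            simp [List.filter, h']
          · rw [if_neg h]
            have h' : temp.length = 0 := by
              simp only [List.length_append, List.length_cons, List.length_nil] at h; omega
            simp [List.filter, h']
        have hA : pvRecA thr (x :: y :: l') (G.filter (fun r => decide (1 < r.length)), temp)
            = pvRecA thr (y :: l')
                ((G ++ [temp ++ [x]]).filter (fun r => decide (1 < r.length)), []) := by
          simp only [pvRecA]
          rw [if_pos hc, hfilter]
        rw [hA, ih (G ++ [temp ++ [x]]) []]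
        simp only [pvRunsRec, if_pos hc]
        cases h : pvRunsRec thr (y :: l') with
        | nil => exact absurd h (pvRunsRec_ne_nil thr (y :: l'))
        | cons r rs => simp [pvConsHead]
      · have hA : pvRecA thr (x :: y :: l') (G.filter (fun r => decide (1 < r.length)), temp)
            = pvRecA thr (y :: l') (G.filter (fun r => decide (1 < r.length)), temp ++ [x]) := by
          simp only [pvRecA]
          rw [if_neg hc]
        rw [hA, ih G (temp ++ [x])]
        simp only [pvRunsRec, if_neg hc]
        cases h : pvRunsRec thr (y :: l') with
        | nil => exact absurd h (pvRunsRec_ne_nil thr (y :: l'))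
        | cons r rs => simp [pvConsHead]

-- shifting every boundary by one prepends the head element to the first run
lemma pvRunsOf_shift (x : Int) (l : List Int) (c : Nat) (cs : List Nat) :
    pvRunsOf (x :: l) ((c :: cs).map (· + 1)) = pvConsHead [x] (pvRunsOf l (c :: cs)) := by
  simp only [pvRunsOf, List.map_cons, List.zip_cons_cons, pvConsHead]
  apply List.cons_eq_cons.mpr
  constructor
  · simp
  · rw [show ((c + 1) :: cs.map (· + 1) : List Nat) = (c :: cs).map (· + 1) from rfl,
        List.zip_map, List.map_map]
    apply List.map_congr_left
    intro p _
    obtain ⟨a, b⟩ := p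
    simp

-- a leading cut at 1 splits off the head element as its own run
lemma pvRunsOf_cut (x : Int) (l : List Int) (c : Nat) (cs : List Nat) :
    pvRunsOf (x :: l) (1 :: (c :: cs).map (· + 1)) = [x] :: pvRunsOf l (c :: cs) := by
  have h := pvRunsOf_shift x l 0 (c :: cs)
  have h0 : pvRunsOf l (0 :: c :: cs) = [] :: pvRunsOf l (c :: cs) := by
    simp [pvRunsOf, List.zip_cons_cons]
  rw [show (1 :: (c :: cs).map (· + 1) : List Nat) = (0 :: c :: cs).map (· + 1) from by simp,
      h, h0, pvConsHead]
  simp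

-- slicing between the cut boundaries yields exactly the recursive run partition
lemma pvRunsOf_cuts (thr : Int) :
    ∀ (xs : List Int), pvRunsOf xs (pvCutsN thr xs ++ [xs.length]) = pvRunsRec thr xs := by
  intro xs
  induction xs with
  | nil => simp [pvRunsOf, pvCutsN, pvRunsRec]
  | cons x l ih =>
    cases l with
    | nil => simp [pvRunsOf, pvCutsN, pvRunsRec]
    | cons y l' =>
      by_cases hc : y - x > thr
      · have hb : pvCutsN thr (x :: y :: l') ++ [(x :: y :: l').length]
            = 1 :: ((pvCutsN thr (y :: l') ++ [(y :: l').length]).map (· + 1)) := by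
          simp [pvCutsN, hc]
        rw [hb]
        cases h : pvCutsN thr (y :: l') ++ [(y :: l').length] with
        | nil => simp at h
        | cons c cs =>
          rw [pvRunsOf_cut x (y :: l') c cs, ← h, ih]
          simp [pvRunsRec, hc]
      · have hb : pvCutsN thr (x :: y :: l') ++ [(x :: y :: l').length]
            = (pvCutsN thr (y :: l') ++ [(y :: l').length]).map (· + 1) := by
          simp [pvCutsN, hc]
        rw [hb]
        cases h : pvCutsN thr (y :: l') ++ [(y :: l').length] with
        | nil => simp at h
        | cons c cs =>
          rw [pvRunsOf_shift x (y :: l') c cs, ← h, ih]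
          simp [pvRunsRec, hc]

-- the Int-level comprehension over range(n-1) computes the Nat-level cuts
lemma pvCutsInt (thr : Int) :
    ∀ (tf : List Int),
      ((PySem.List.pyRange 0 ((tf.length : Int) - 1) 1).filter
        (fun i => decide (PySem.List.pyGetD tf (i + 1) 0
                          - PySem.List.pyGetD tf i 0 > thr))).map (fun i => i + 1)
        = (pvCutsN thr tf).map (fun k : Nat => (k : Int)) := by
  intro tf
  induction tf with
  | nil => simp [PySem.List.pyRange_one_eq_nil, pvCutsN]
  | cons x l ih =>
    cases l with
    | nil =>
      simp [pvCutsN, PySem.List.pyRange_one_eq_nil]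
    | cons y l' =>
      have hlen : ((x :: y :: l').length : Int) - 1 = ((y :: l').length : Int) := by
        push_cast [List.length_cons]; ring
      rw [hlen]
      have hpos : (0 : Int) < ((y :: l').length : Int) :=
        Int.natCast_pos.mpr (by simp)
      rw [PySem.List.pyRange_one_cons hpos]
      have hshift : PySem.List.pyRange (0 + 1) ((y :: l').length : Int) 1
          = (PySem.List.pyRange 0 (((y :: l').length : Int) - 1) 1).map (fun i => i + 1) := by
        rw [PySem.List.pyRange_one, PySem.List.pyRange_one]
        rw [List.map_map]
        have : (((y :: l').length : Int) - (0 + 1)).toNat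
            = ((((y :: l').length : Int) - 1) - 0).toNat := by omega
        rw [this]
        apply List.map_congr_left
        intro k _
        simp; ring
      have hhead : PySem.List.pyGetD (x :: y :: l') (0 + 1) 0
          - PySem.List.pyGetD (x :: y :: l') 0 0 = y - x := by
        have h1 : PySem.List.pyGetD (x :: y :: l') ((1 : Nat) : Int) 0 = y := by
          rw [PySem.List.pyGetD_natCast]; simp
        have h0 : PySem.List.pyGetD (x :: y :: l') ((0 : Nat) : Int) 0 = x := by
          rw [PySem.List.pyGetD_natCast]; simp
        simpa using congrArg₂ (· - ·) h1 h0
      have hfcongr : (PySem.List.pyRange 0 (((y :: l').length : Int) - 1) 1).filter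
            ((fun i => decide (PySem.List.pyGetD (x :: y :: l') (i + 1) 0
                - PySem.List.pyGetD (x :: y :: l') i 0 > thr)) ∘ (fun i => i + 1))
          = (PySem.List.pyRange 0 (((y :: l').length : Int) - 1) 1).filter
            (fun i => decide (PySem.List.pyGetD (y :: l') (i + 1) 0
                - PySem.List.pyGetD (y :: l') i 0 > thr)) := by
        apply List.filter_congr
        intro i hi
        have hge : 0 ≤ i := (PySem.List.mem_pyRange_one.mp hi).1
        have e1 : PySem.List.pyGetD (x :: y :: l') (i + 1 + 1) 0
            = PySem.List.pyGetD (y :: l') (i + 1) 0 := by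
          obtain ⟨k, rfl⟩ := Int.eq_ofNat_of_zero_le hge
          have h2 : (k : Int) + 1 + 1 = ((k + 2 : Nat) : Int) := by push_cast; ring
          rw [h2, PySem.List.pyGetD_natCast]
          have h3 : (k : Int) + 1 = ((k + 1 : Nat) : Int) := by push_cast; ring
          rw [h3, PySem.List.pyGetD_natCast]
          simp
        have e0 : PySem.List.pyGetD (x :: y :: l') (i + 1) 0
            = PySem.List.pyGetD (y :: l') i 0 := by
          obtain ⟨k, rfl⟩ := Int.eq_ofNat_of_zero_le hge
          have h3 : (k : Int) + 1 = ((k + 1 : Nat) : Int) := by push_cast; ring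
          rw [h3, PySem.List.pyGetD_natCast, PySem.List.pyGetD_natCast]
          simp
        simp only [Function.comp_apply, e1, e0]
      rw [hshift, List.filter_cons]
      simp only [hhead]
      by_cases hc : y - x > thr
      · rw [if_pos (by simpa using hc), List.map_cons, List.filter_map, hfcongr, ih]
        simp only [pvCutsN, if_pos hc, List.singleton_append, List.map_cons, List.map_map]
        apply List.cons_eq_cons.mpr
        constructor
        · norm_num
        · apply List.map_congr_left
          intro k _
          simp only [Function.comp_apply]
          push_cast; ring
      · rw [if_neg (by simpa using hc), List.filter_map, hfcongr, ih]
        simp only [pvCutsN, if_neg hc, List.nil_append, List.map_map]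
        apply List.map_congr_left
        intro k _
        simp only [Function.comp_apply]
        push_cast; ring

-- B's slice pipeline, at Int level, computes pvRunsOf at the Nat cut boundaries
lemma pvAltRuns (tf : List Int) (thr : Int) :
    (((0 : Int) :: ((pvCutsN thr tf).map (fun k : Nat => (k : Int)) ++ [(tf.length : Int)])).zip
        (PySem.List.slice ((0 : Int) :: ((pvCutsN thr tf).map (fun k : Nat => (k : Int)) ++ [(tf.length : Int)])) (some 1) none)).map
        (fun p => PySem.List.slice tf (some p.1) (some p.2))
      = pvRunsOf tf (pvCutsN thr tf ++ [tf.length]) := by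
  rw [PySem.List.slice_from_one]
  have hb : ((0 : Int) :: ((pvCutsN thr tf).map (fun k : Nat => (k : Int)) ++ [(tf.length : Int)]))
      = ((0 :: (pvCutsN thr tf ++ [tf.length])).map (fun k : Nat => (k : Int))) := by
    rw [List.map_cons, List.map_append, List.map_singleton, Nat.cast_zero]
  rw [hb]
  have ht : ((0 :: (pvCutsN thr tf ++ [tf.length])).map (fun k : Nat => (k : Int))).tail
      = (pvCutsN thr tf ++ [tf.length]).map (fun k : Nat => (k : Int)) := by
    rw [List.map_cons, List.tail_cons]
  rw [ht, List.zip_map, List.map_map, pvRunsOf]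
  apply List.map_congr_left
  intro p _
  simp only [Function.comp_apply, Prod.map]
  exact PySem.List.slice_natCast tf p.1 p.2

-- ===== VERDICT (by name: the statement is the Claim_ definition above) =====
theorem message_frame_compress_spec : Claim_equal_message_frame_compress := by
  intro tf thr _
  unfold Spec_message_frame_compress message_frame_compress message_frame_compress_alt
  dsimp only
  have hA := pvFoldA_eq_recA tf thr tf 0 ([], []) (by simp)
  rw [Nat.cast_zero] at hA
  rw [hA]
  rw [pvCutsInt thr tf, pvAltRuns tf thr, pvRunsOf_cuts thr tf]
  have h := pvCore thr tf [] []
  simp only [List.filter_nil, List.nil_append] at h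
  rw [h]
  cases hr : pvRunsRec thr tf with
  | nil => exact absurd hr (pvRunsRec_ne_nil thr tf)
  | cons r rs => simp [pvConsHead]
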